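-- pv_equiv track=rewrite | github.com/cybercharger/algorithm | SegmentOverlap.py | cal_max_overlap
-- ===== SOURCE A (Python) =====
-- from typing import List, Tuple
--
-- class SegmentInfo:
--     def __init__(self, start: int, end: int, sid: int, gid: int):
--         self.start = start if start <= end else end
--         self.end = end if start <= end else start
--         self.sid = sid
--         self.gid = gid
--
--     def __repr__(self) -> str:
--         return f'(s:{self.start}, e:{self.end}, i:{self.sid}, g:{self.gid})'
--
-- def cal_max_overlap(group1: List[Tuple[int, int]], group2: List[Tuple[int, int]]) -> int:
--     if group1 is None or group2 is None or len(group1) == 0 or len(group2) == 0: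
--         return 0
--
--     starts1 = sorted([SegmentInfo(start=p[0], end=p[1], sid=i, gid=0) for i, p in enumerate(group1)], key=lambda x: x.start)
--     starts2 = sorted([SegmentInfo(start=p[0], end=p[1], sid=i, gid=1) for i, p in enumerate(group2)], key=lambda x: x.start)
--     starts = [starts1, starts2]
--
--     ends1 = [SegmentInfo(start=p[0], end=p[1], sid=i, gid=0) for i, p in enumerate(group1)]
--     ends2 = [SegmentInfo(start=p[0], end=p[1], sid=i, gid=1) for i, p in enumerate(group2)]
--     ends = sorted(ends1 + ends2, key=lambda x: x.end)
--
--     # cur[0] is the pointer for top of sorted start points of group1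
--     # cur[1] is the pointer for top of sorted start points of group2
--     cur = [0, 0]
--     max_overlap = 0
--     for segment in ends:
--         target_group = starts[segment.gid]
--         if segment.sid != target_group[cur[segment.gid]].sid:
--             continue
--         max_overlap = max(max_overlap, segment.end - max(starts[0][cur[0]].start, starts[1][cur[1]].start))
--
--         # find the next segment not covered by current segment
--         while target_group[cur[segment.gid]].end <= segment.end:
--             cur[segment.gid] += 1
--             if cur[segment.gid] >= len(starts[segment.gid]):
--                 return max_overlap
--
--     return max_overlap
-- ===== SOURCE B (Python) =====
-- def cal_max_overlap(group1, group2):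
--     if group1 is None or group2 is None or len(group1) == 0 or len(group2) == 0:
--         return 0
--     best = 0
--     for a, b in group1:
--         for c, d in group2:
--             best = max(best, min(max(a, b), max(c, d)) - max(min(a, b), min(c, d)))
--     return best
-- ===== Notes on version B (the rewrite author's own statement) =====
-- stated objective: simpler
-- what changed: Replaces A's two stable sorts, a merged end-ordered sweep with per-group pointers and early return by a direct pairwise scan that takes the maximum of min(hi,hi)-max(lo,lo) over all cross-group pairs, floored at 0.
import Mathlib
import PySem

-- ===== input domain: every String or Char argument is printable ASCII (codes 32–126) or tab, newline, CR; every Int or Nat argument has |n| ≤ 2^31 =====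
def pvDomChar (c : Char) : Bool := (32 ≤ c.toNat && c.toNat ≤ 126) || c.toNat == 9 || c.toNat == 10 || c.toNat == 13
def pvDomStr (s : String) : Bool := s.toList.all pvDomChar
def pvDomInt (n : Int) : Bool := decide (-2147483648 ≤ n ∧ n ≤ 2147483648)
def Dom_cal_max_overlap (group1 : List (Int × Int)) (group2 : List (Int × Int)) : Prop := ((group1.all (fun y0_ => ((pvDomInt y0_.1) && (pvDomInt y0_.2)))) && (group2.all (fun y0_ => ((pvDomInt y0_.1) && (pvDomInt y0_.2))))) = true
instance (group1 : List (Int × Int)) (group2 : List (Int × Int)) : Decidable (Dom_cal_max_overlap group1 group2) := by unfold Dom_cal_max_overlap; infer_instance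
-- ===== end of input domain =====

-- B replaces A's sort-and-sweep (two stable sorts, end-ordered merge, per-group pointers, early
-- return) by a direct pairwise maximum of min(hi,hi)-max(lo,lo) floored at 0: simpler, no sorting.

-- ===== PORT A =====
-- SegmentInfo: __init__ swaps start/end so that lo ≤ hi ('end' is reserved in Lean, fields lo/hi).
structure PySeg where
  lo : Int
  hi : Int
  sid : Int
  gid : Int
deriving DecidableEq, Repr

def mkSeg (i : Int) (g : Int) (p : Int × Int) : PySeg :=
  ⟨if p.1 ≤ p.2 then p.1 else p.2, if p.1 ≤ p.2 then p.2 else p.1, i, g⟩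

-- [SegmentInfo(start=p[0], end=p[1], sid=i, gid=g) for i, p in enumerate(group)]
def segsOf (g : List (Int × Int)) (gid : Int) : List PySeg :=
  (PySem.List.enumerate g 0).map (fun ip => mkSeg ip.1 gid ip.2)

-- the inner while loop: advance cur past entries with end <= e; none = the early 'return' (cur ran
-- off the end), some c' = the loop stopped with cur = c'.
def segAdvance (sg : List PySeg) (e : Int) (c : Nat) : Option Nat :=
  if h : c < sg.length then
    if sg[c].hi ≤ e then segAdvance sg e (c + 1) else some c
  else none
termination_by sg.length - c

-- the 'for segment in ends' loop; state = (cur[0], cur[1], max_overlap).  Python's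
-- target_group[cur[g]] raises IndexError when out of range; that is unreachable (the early return
-- fires first), so the port reads it with getD and a dummy default.
def segLoop (S0 S1 : List PySeg) (c0 c1 : Nat) (m : Int) : List PySeg → Int
  | [] => m
  | s :: rest =>
    if s.gid = 0 then
      if s.sid = (S0.getD c0 ⟨0, 0, 0, 0⟩).sid then
        let m' := max m (s.hi - max (S0.getD c0 ⟨0, 0, 0, 0⟩).lo (S1.getD c1 ⟨0, 0, 0, 0⟩).lo)
        match segAdvance S0 s.hi c0 with
        | none => m'
        | some c0' => segLoop S0 S1 c0' c1 m' rest
      else segLoop S0 S1 c0 c1 m rest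
    else
      if s.sid = (S1.getD c1 ⟨0, 0, 0, 0⟩).sid then
        let m' := max m (s.hi - max (S0.getD c0 ⟨0, 0, 0, 0⟩).lo (S1.getD c1 ⟨0, 0, 0, 0⟩).lo)
        match segAdvance S1 s.hi c1 with
        | none => m'
        | some c1' => segLoop S0 S1 c0 c1' m' rest
      else segLoop S0 S1 c0 c1 m rest

def cal_max_overlap (group1 : List (Int × Int)) (group2 : List (Int × Int)) : Int :=
  if group1.isEmpty || group2.isEmpty then 0
  else
    let starts1 := PySem.List.sorted (segsOf group1 0) (fun x => x.lo)
    let starts2 := PySem.List.sorted (segsOf group2 1) (fun x => x.lo)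
    let ends := PySem.List.sorted (segsOf group1 0 ++ segsOf group2 1) (fun x => x.hi)
    segLoop starts1 starts2 0 0 0 ends

-- ===== PORT B =====
def cal_max_overlap_alt (group1 : List (Int × Int)) (group2 : List (Int × Int)) : Int :=
  if group1.isEmpty || group2.isEmpty then 0
  else
    group1.foldl (fun best p =>
      group2.foldl (fun best q =>
        max best (min (max p.1 p.2) (max q.1 q.2) - max (min p.1 p.2) (min q.1 q.2))) best) 0

-- ===== PRECONDITION & SPEC =====
def Spec_cal_max_overlap (group1 : List (Int × Int)) (group2 : List (Int × Int)) (out : Int) : Prop := out = cal_max_overlap_alt group1 group2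
instance (group1 : List (Int × Int)) (group2 : List (Int × Int)) (out : Int) : Decidable (Spec_cal_max_overlap group1 group2 out) := by unfold Spec_cal_max_overlap; infer_instance

-- ===== CLAIM (what is proved, stated in full; the proofs are below) =====
def Claim_equal_cal_max_overlap : Prop := ∀ (group1 : List (Int × Int)) (group2 : List (Int × Int)), Dom_cal_max_overlap group1 group2 → Spec_cal_max_overlap group1 group2 (cal_max_overlap group1 group2)

-- ===== LEMMAS AND PROOFS =====

-- overlap of two (already normalised) segments
def ov (p q : PySeg) : Int := min p.hi q.hi - max p.lo q.lo

-- B's per-pair value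
def fpair (p q : Int × Int) : Int :=
  min (max p.1 p.2) (max q.1 q.2) - max (min p.1 p.2) (min q.1 q.2)

lemma ov_mkSeg (i j g h : Int) (p q : Int × Int) : ov (mkSeg i g p) (mkSeg j h q) = fpair p q := by
  unfold ov mkSeg fpair
  dsimp only
  split_ifs <;> omega

-- the inner fold of B is a running max
lemma foldl_inner (g2 : List (Int × Int)) (p : Int × Int) (a : Int) :
    a ≤ g2.foldl (fun best q => max best (fpair p q)) a ∧
    (∀ q ∈ g2, fpair p q ≤ g2.foldl (fun best q => max best (fpair p q)) a) ∧
    (g2.foldl (fun best q => max best (fpair p q)) a = a ∨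
      ∃ q ∈ g2, g2.foldl (fun best q => max best (fpair p q)) a = fpair p q) := by
  induction g2 generalizing a with
  | nil => simp
  | cons q t ih =>
    obtain ⟨h1, h2, h3⟩ := ih (max a (fpair p q))
    refine ⟨le_trans (le_max_left _ _) h1, ?_, ?_⟩
    · intro r hr
      rcases List.mem_cons.mp hr with hr | hr
      · subst hr; exact le_trans (le_max_right _ _) h1
      · exact h2 r hr
    · rcases h3 with h3 | h3
      · rcases max_choice a (fpair p q) with hc | hc
        · left; simp only [List.foldl_cons]; exact h3.trans hc
        · right; refine ⟨q, by simp, ?_⟩; simp only [List.foldl_cons]; exact h3.trans hc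
      · obtain ⟨r, hr, h3⟩ := h3
        right; exact ⟨r, List.mem_cons_of_mem _ hr, by simp only [List.foldl_cons]; exact h3⟩

def pairFold (g1 g2 : List (Int × Int)) : Int :=
  g1.foldl (fun best p => g2.foldl (fun best q => max best (fpair p q)) best) 0

lemma foldl_outer (g1 g2 : List (Int × Int)) (a : Int) :
    a ≤ g1.foldl (fun best p => g2.foldl (fun best q => max best (fpair p q)) best) a ∧
    (∀ p ∈ g1, ∀ q ∈ g2, fpair p q ≤ g1.foldl (fun best p => g2.foldl (fun best q => max best (fpair p q)) best) a) ∧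
    (g1.foldl (fun best p => g2.foldl (fun best q => max best (fpair p q)) best) a = a ∨
      ∃ p ∈ g1, ∃ q ∈ g2, g1.foldl (fun best p => g2.foldl (fun best q => max best (fpair p q)) best) a = fpair p q) := by
  induction g1 generalizing a with
  | nil => simp
  | cons p t ih =>
    obtain ⟨i1, i2, i3⟩ := foldl_inner g2 p a
    obtain ⟨h1, h2, h3⟩ := ih (g2.foldl (fun best q => max best (fpair p q)) a)
    refine ⟨le_trans i1 h1, ?_, ?_⟩
    · intro r hr q hq
      rcases List.mem_cons.mp hr with hr | hr
      · subst hr; exact le_trans (i2 q hq) h1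
      · exact h2 r hr q hq
    · rcases h3 with h3 | h3
      · rcases i3 with i3 | i3
        · left; simp only [List.foldl_cons]; exact h3.trans i3
        · obtain ⟨q, hq, i3⟩ := i3
          right; refine ⟨p, by simp, q, hq, ?_⟩; simp only [List.foldl_cons]; exact h3.trans i3
      · obtain ⟨r, hr, q, hq, h3⟩ := h3
        right; exact ⟨r, List.mem_cons_of_mem _ hr, q, hq, by simp only [List.foldl_cons]; exact h3⟩

lemma pairFold_nonneg (g1 g2 : List (Int × Int)) : 0 ≤ pairFold g1 g2 :=
  (foldl_outer g1 g2 0).1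

lemma pairFold_ge (g1 g2 : List (Int × Int)) (p : Int × Int) (hp : p ∈ g1) (q : Int × Int) (hq : q ∈ g2) :
    fpair p q ≤ pairFold g1 g2 :=
  (foldl_outer g1 g2 0).2.1 p hp q hq

lemma pairFold_attained (g1 g2 : List (Int × Int)) :
    pairFold g1 g2 = 0 ∨ ∃ p ∈ g1, ∃ q ∈ g2, pairFold g1 g2 = fpair p q :=
  (foldl_outer g1 g2 0).2.2

-- segsOf facts
lemma mem_segsOf (s : PySeg) (g : List (Int × Int)) (gid : Int) :
    s ∈ segsOf g gid ↔ ∃ (k : Nat) (h : k < g.length), s = mkSeg k gid g[k] := by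
  unfold segsOf
  simp only [List.mem_map, PySem.List.mem_enumerate_iff]
  constructor
  · rintro ⟨ip, ⟨k, hk, rfl⟩, rfl⟩
    exact ⟨k, hk, by simp⟩
  · rintro ⟨k, hk, rfl⟩
    exact ⟨((k : Int), g[k]), ⟨k, hk, by simp⟩, rfl⟩

lemma gid_segsOf (s : PySeg) (g : List (Int × Int)) (gid : Int) (hs : s ∈ segsOf g gid) : s.gid = gid := by
  rw [mem_segsOf] at hs
  obtain ⟨k, hk, rfl⟩ := hs
  rfl

lemma sid_inj_segsOf (s t : PySeg) (g : List (Int × Int)) (gid : Int)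
    (hs : s ∈ segsOf g gid) (ht : t ∈ segsOf g gid) (h : s.sid = t.sid) : s = t := by
  rw [mem_segsOf] at hs ht
  obtain ⟨k, hk, rfl⟩ := hs
  obtain ⟨l, hl, rfl⟩ := ht
  have : k = l := by
    have : (k : Int) = (l : Int) := h
    exact_mod_cast this
  subst this; rfl

lemma length_segsOf (g : List (Int × Int)) (gid : Int) : (segsOf g gid).length = g.length := by
  unfold segsOf
  simp [PySem.List.length_enumerate]

-- ov of two segments of the two groups is bounded by B's fold, and B's fold is attained
lemma ov_le_pairFold (g1 g2 : List (Int × Int)) (p q : PySeg)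
    (hp : p ∈ segsOf g1 0) (hq : q ∈ segsOf g2 1) : ov p q ≤ pairFold g1 g2 := by
  rw [mem_segsOf] at hp hq
  obtain ⟨k, hk, rfl⟩ := hp
  obtain ⟨l, hl, rfl⟩ := hq
  rw [ov_mkSeg]
  exact pairFold_ge g1 g2 _ (by simp) _ (by simp)

lemma pairFold_cases (g1 g2 : List (Int × Int)) :
    pairFold g1 g2 = 0 ∨ ∃ p ∈ segsOf g1 0, ∃ q ∈ segsOf g2 1, ov p q = pairFold g1 g2 := by
  rcases pairFold_attained g1 g2 with h | ⟨p, hp, q, hq, h⟩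
  · exact Or.inl h
  · right
    obtain ⟨k, hk, rfl⟩ := List.mem_iff_getElem.mp hp
    obtain ⟨l, hl, rfl⟩ := List.mem_iff_getElem.mp hq
    refine ⟨mkSeg k 0 g1[k], ?_, mkSeg l 1 g2[l], ?_, ?_⟩
    · rw [mem_segsOf]; exact ⟨k, hk, rfl⟩
    · rw [mem_segsOf]; exact ⟨l, hl, rfl⟩
    · rw [ov_mkSeg, h]

-- drop/sorted helpers
lemma drop_cons_of_lt {l : List PySeg} {c : Nat} (h : c < l.length) :
    l.drop c = l.getD c ⟨0, 0, 0, 0⟩ :: l.drop (c + 1) := by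
  rw [List.getD_eq_getElem l _ h]
  exact (List.getElem_cons_drop h).symm

lemma head_drop_le {l : List PySeg} {key : PySeg → Int} (hp : l.Pairwise (fun a b => key a ≤ key b))
    {c : Nat} (h : c < l.length) {x : PySeg} (hx : x ∈ l.drop c) :
    key (l.getD c ⟨0, 0, 0, 0⟩) ≤ key x := by
  have hsub : List.Sublist (l.drop c) l := List.drop_sublist c l
  have hpd : (l.drop c).Pairwise (fun a b => key a ≤ key b) := hp.sublist hsub
  rw [drop_cons_of_lt h] at hpd hx
  rcases List.mem_cons.mp hx with hx | hx
  · simp [hx]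
  · exact (List.pairwise_cons.mp hpd).1 x hx

-- segAdvance specs
lemma segAdvance_none (sg : List PySeg) (e : Int) (c : Nat) (h : segAdvance sg e c = none) :
    ∀ p ∈ sg.drop c, p.hi ≤ e := by
  fun_induction segAdvance sg e c with
  | case1 c hc hle ih =>
    intro p hp
    rw [drop_cons_of_lt hc] at hp
    rcases List.mem_cons.mp hp with hp | hp
    · rw [hp, List.getD_eq_getElem sg _ hc]; exact hle
    · exact ih h p hp
  | case2 c hc hgt => simp at h
  | case3 c hc => intro p hp; rw [List.drop_eq_nil_of_le (by omega)] at hp; simp at hp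

lemma segAdvance_some (sg : List PySeg) (e : Int) (c : Nat) (c' : Nat)
    (h : segAdvance sg e c = some c') :
    c' < sg.length ∧ e < (sg.getD c' ⟨0, 0, 0, 0⟩).hi ∧
      ∀ p ∈ sg.drop c, p ∈ sg.drop c' ∨ p.hi ≤ e := by
  fun_induction segAdvance sg e c with
  | case1 c hc hle ih =>
    obtain ⟨h1, h2, h3⟩ := ih h
    refine ⟨h1, h2, ?_⟩
    intro p hp
    rw [drop_cons_of_lt hc] at hp
    rcases List.mem_cons.mp hp with hp | hp
    · right; rw [hp, List.getD_eq_getElem sg _ hc]; exact hle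
    · exact h3 p hp
  | case2 c hc hgt =>
    have : c = c' := by simpa using h
    subst this
    refine ⟨hc, by rw [List.getD_eq_getElem sg _ hc]; omega, fun p hp => Or.inl hp⟩
  | case3 c hc => simp at h

lemma mem_drop_head {l : List PySeg} {c : Nat} (h : c < l.length) :
    l.getD c ⟨0, 0, 0, 0⟩ ∈ l.drop c := by
  rw [drop_cons_of_lt h]; exact List.mem_cons_self

-- ===== the main loop invariant =====

-- the big sweep lemma: under the invariant, segLoop computes exactly V = pairFold g1 g2.
lemma segLoop_eq (g1 g2 : List (Int × Int)) (S0 S1 : List PySeg)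
    (hperm0 : S0.Perm (segsOf g1 0)) (hperm1 : S1.Perm (segsOf g2 1))
    (hsort0 : S0.Pairwise (fun a b => a.lo ≤ b.lo)) (hsort1 : S1.Pairwise (fun a b => a.lo ≤ b.lo))
    (E : List PySeg) (c0 c1 : Nat) (m : Int)
    (hE : E.Pairwise (fun a b => a.hi ≤ b.hi))
    (hproc : ∀ u, (u ∈ segsOf g1 0 ∨ u ∈ segsOf g2 1) → u ∉ E → ∀ z ∈ E, u.hi ≤ z.hi)
    (hEsub : ∀ z ∈ E, z ∈ segsOf g1 0 ∨ z ∈ segsOf g2 1)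
    (hc0 : c0 < S0.length) (hc1 : c1 < S1.length)
    (hy0 : S0.getD c0 ⟨0, 0, 0, 0⟩ ∈ E) (hy1 : S1.getD c1 ⟨0, 0, 0, 0⟩ ∈ E)
    (hm0 : 0 ≤ m) (hmV : m ≤ pairFold g1 g2)
    (halive : pairFold g1 g2 ≤ m ∨ ∃ p q, p ∈ S0.drop c0 ∧ q ∈ S1.drop c1 ∧
      p ∈ E ∧ q ∈ E ∧ ov p q = pairFold g1 g2) :
    segLoop S0 S1 c0 c1 m E = pairFold g1 g2 := by
  induction E generalizing c0 c1 m with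
  | nil => exact absurd hy0 (List.not_mem_nil)
  | cons s rest ih =>
    have hpe : ∀ z ∈ rest, s.hi ≤ z.hi := (List.pairwise_cons.mp hE).1
    have hErest : rest.Pairwise (fun a b => a.hi ≤ b.hi) := (List.pairwise_cons.mp hE).2
    have hprocrest : ∀ u, (u ∈ segsOf g1 0 ∨ u ∈ segsOf g2 1) → u ∉ rest →
        ∀ z ∈ rest, u.hi ≤ z.hi := by
      intro u hu hnot z hz
      by_cases hus : u = s
      · subst hus; exact hpe z hz
      · exact hproc u hu (by simp [hus, hnot]) z (List.mem_cons_of_mem _ hz)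
    have hEsubrest : ∀ z ∈ rest, z ∈ segsOf g1 0 ∨ z ∈ segsOf g2 1 :=
      fun z hz => hEsub z (List.mem_cons_of_mem _ hz)
    have hy0mem : S0.getD c0 ⟨0, 0, 0, 0⟩ ∈ S0 := by
      rw [List.getD_eq_getElem S0 _ hc0]; exact List.getElem_mem hc0
    have hy1mem : S1.getD c1 ⟨0, 0, 0, 0⟩ ∈ S1 := by
      rw [List.getD_eq_getElem S1 _ hc1]; exact List.getElem_mem hc1
    have hy0A : S0.getD c0 ⟨0, 0, 0, 0⟩ ∈ segsOf g1 0 := hperm0.mem_iff.mp hy0mem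
    have hy1A : S1.getD c1 ⟨0, 0, 0, 0⟩ ∈ segsOf g2 1 := hperm1.mem_iff.mp hy1mem
    have hy0gid : (S0.getD c0 ⟨0, 0, 0, 0⟩).gid = 0 := gid_segsOf _ g1 0 hy0A
    have hy1gid : (S1.getD c1 ⟨0, 0, 0, 0⟩).gid = 1 := gid_segsOf _ g2 1 hy1A
    by_cases hgid : s.gid = 0
    · -- segment from group 1 (gid 0)
      have hsA : s ∈ segsOf g1 0 := by
        rcases hEsub s (List.mem_cons_self) with h | h
        · exact h
        · exact absurd (gid_segsOf s g2 1 h) (by rw [hgid]; decide)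
      have hy1ne : S1.getD c1 ⟨0, 0, 0, 0⟩ ≠ s := by
        intro hcon; rw [hcon, hgid] at hy1gid; exact absurd hy1gid (by decide)
      have hy1rest : S1.getD c1 ⟨0, 0, 0, 0⟩ ∈ rest := by
        rcases List.mem_cons.mp hy1 with h | h
        · exact absurd h hy1ne
        · exact h
      have hy1hi : s.hi ≤ (S1.getD c1 ⟨0, 0, 0, 0⟩).hi := hpe _ hy1rest
      by_cases hsid : s.sid = (S0.getD c0 ⟨0, 0, 0, 0⟩).sid
      · -- match: s is the current pointer segment of group 1
        have hseq : s = S0.getD c0 ⟨0, 0, 0, 0⟩ := sid_inj_segsOf _ _ g1 0 hsA hy0A hsid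
        set y1 := S1.getD c1 ⟨0, 0, 0, 0⟩ with hy1def
        set cand := s.hi - max (S0.getD c0 ⟨0, 0, 0, 0⟩).lo y1.lo with hcanddef
        have hcand : cand = ov s y1 := by
          rw [hcanddef, ← hseq]; unfold ov; omega
        have hcandV : cand ≤ pairFold g1 g2 := by
          rw [hcand]; exact ov_le_pairFold g1 g2 s y1 hsA hy1A
        have hm'V : max m cand ≤ pairFold g1 g2 := max_le hmV hcandV
        simp only [segLoop, if_pos hgid, if_pos hsid]
        rcases hadv : segAdvance S0 s.hi c0 with _ | c0'
        · -- early return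
          rcases halive with hV | ⟨p, q, hpd, hqd, hpE, hqE, hovV⟩
          · exact le_antisymm hm'V (le_trans hV (le_max_left _ _))
          · have hqrest : q ∈ rest := by
              rcases List.mem_cons.mp hqE with h | h
              · exfalso
                have : q.gid = 1 := gid_segsOf q g2 1 (hperm1.mem_iff.mp (List.mem_of_mem_drop hqd))
                rw [h, hgid] at this; exact absurd this (by decide)
              · exact h
            have hqhi : s.hi ≤ q.hi := hpe _ hqrest
            have hphi : p.hi ≤ s.hi := segAdvance_none S0 s.hi c0 hadv p hpd
            have hplo : (S0.getD c0 ⟨0, 0, 0, 0⟩).lo ≤ p.lo :=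
              head_drop_le hsort0 hc0 hpd
            have hqlo : y1.lo ≤ q.lo := head_drop_le hsort1 hc1 hqd
            have : pairFold g1 g2 ≤ cand := by
              rw [← hovV]; unfold ov; omega
            exact le_antisymm hm'V (le_trans this (le_max_right _ _))
        · -- pointer advanced, continue
          obtain ⟨hlt', hhi', hmove⟩ := segAdvance_some S0 s.hi c0 c0' hadv
          have hz0A : S0.getD c0' ⟨0, 0, 0, 0⟩ ∈ segsOf g1 0 := by
            refine hperm0.mem_iff.mp ?_
            rw [List.getD_eq_getElem S0 _ hlt']; exact List.getElem_mem hlt'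
          have hz0rest : S0.getD c0' ⟨0, 0, 0, 0⟩ ∈ rest := by
            by_cases hin : S0.getD c0' ⟨0, 0, 0, 0⟩ ∈ s :: rest
            · rcases List.mem_cons.mp hin with h | h
              · exfalso; rw [h] at hhi'; omega
              · exact h
            · exfalso
              have := hproc _ (Or.inl hz0A) hin s List.mem_cons_self
              omega
          refine ih c0' c1 (max m cand) hErest hprocrest hEsubrest hlt' hc1 hz0rest hy1rest
            (le_trans hm0 (le_max_left _ _)) hm'V ?_
          rcases halive with hV | ⟨p, q, hpd, hqd, hpE, hqE, hovV⟩
          · exact Or.inl (le_trans hV (le_max_left _ _))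
          · have hqrest : q ∈ rest := by
              rcases List.mem_cons.mp hqE with h | h
              · exfalso
                have : q.gid = 1 := gid_segsOf q g2 1 (hperm1.mem_iff.mp (List.mem_of_mem_drop hqd))
                rw [h, hgid] at this; exact absurd this (by decide)
              · exact h
            have hqhi : s.hi ≤ q.hi := hpe _ hqrest
            have hqlo : y1.lo ≤ q.lo := head_drop_le hsort1 hc1 hqd
            by_cases hps : p = s
            · left
              subst hps
              have hslo : p.lo = (S0.getD c0 ⟨0, 0, 0, 0⟩).lo := by rw [← hseq]
              have : pairFold g1 g2 ≤ cand := by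
                rw [← hovV, hcanddef]; unfold ov; omega
              exact le_trans this (le_max_right _ _)
            · have hprest : p ∈ rest := by
                rcases List.mem_cons.mp hpE with h | h
                · exact absurd h hps
                · exact h
              rcases hmove p hpd with hmv | hmv
              · exact Or.inr ⟨p, q, hmv, hqd, hprest, hqrest, hovV⟩
              · left
                have hplo : (S0.getD c0 ⟨0, 0, 0, 0⟩).lo ≤ p.lo :=
                  head_drop_le hsort0 hc0 hpd
                have : pairFold g1 g2 ≤ cand := by
                  rw [← hovV]; unfold ov; omega
                exact le_trans this (le_max_right _ _)
      · -- skip: s is not the pointer segment of group 1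
        simp only [segLoop, if_pos hgid, if_neg hsid]
        have hy0ne : S0.getD c0 ⟨0, 0, 0, 0⟩ ≠ s := by
          intro hcon; rw [← hcon] at hsid; exact hsid rfl
        have hy0rest : S0.getD c0 ⟨0, 0, 0, 0⟩ ∈ rest := by
          rcases List.mem_cons.mp hy0 with h | h
          · exact absurd h hy0ne
          · exact h
        refine ih c0 c1 m hErest hprocrest hEsubrest hc0 hc1 hy0rest hy1rest hm0 hmV ?_
        rcases halive with hV | ⟨p, q, hpd, hqd, hpE, hqE, hovV⟩
        · exact Or.inl hV
        · have hqrest : q ∈ rest := by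
            rcases List.mem_cons.mp hqE with h | h
            · exfalso
              have : q.gid = 1 := gid_segsOf q g2 1 (hperm1.mem_iff.mp (List.mem_of_mem_drop hqd))
              rw [h, hgid] at this; exact absurd this (by decide)
            · exact h
          by_cases hps : p = s
          · -- replace p by the pointer segment of group 1
            refine Or.inr ⟨S0.getD c0 ⟨0, 0, 0, 0⟩, q, mem_drop_head hc0, hqd, hy0rest, hqrest, ?_⟩
            have hlo : (S0.getD c0 ⟨0, 0, 0, 0⟩).lo ≤ p.lo := head_drop_le hsort0 hc0 hpd
            have hhi : s.hi ≤ (S0.getD c0 ⟨0, 0, 0, 0⟩).hi := hpe _ hy0rest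
            have hge : ov p q ≤ ov (S0.getD c0 ⟨0, 0, 0, 0⟩) q := by
              rw [hps]; unfold ov; rw [hps] at hlo; omega
            have hle : ov (S0.getD c0 ⟨0, 0, 0, 0⟩) q ≤ pairFold g1 g2 :=
              ov_le_pairFold g1 g2 _ q hy0A (hperm1.mem_iff.mp (List.mem_of_mem_drop hqd))
            omega
          · have hprest : p ∈ rest := by
              rcases List.mem_cons.mp hpE with h | h
              · exact absurd h hps
              · exact h
            exact Or.inr ⟨p, q, hpd, hqd, hprest, hqrest, hovV⟩
    · -- segment from group 2 (gid 1), mirror of the case above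
      have hsA : s ∈ segsOf g2 1 := by
        rcases hEsub s (List.mem_cons_self) with h | h
        · exact absurd (gid_segsOf s g1 0 h) hgid
        · exact h
      have hy0ne : S0.getD c0 ⟨0, 0, 0, 0⟩ ≠ s := by
        intro hcon; rw [hcon] at hy0gid; exact hgid hy0gid
      have hy0rest : S0.getD c0 ⟨0, 0, 0, 0⟩ ∈ rest := by
        rcases List.mem_cons.mp hy0 with h | h
        · exact absurd h hy0ne
        · exact h
      have hy0hi : s.hi ≤ (S0.getD c0 ⟨0, 0, 0, 0⟩).hi := hpe _ hy0rest
      by_cases hsid : s.sid = (S1.getD c1 ⟨0, 0, 0, 0⟩).sid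
      · have hseq : s = S1.getD c1 ⟨0, 0, 0, 0⟩ := sid_inj_segsOf _ _ g2 1 hsA hy1A hsid
        set y0 := S0.getD c0 ⟨0, 0, 0, 0⟩ with hy0def
        set cand := s.hi - max y0.lo (S1.getD c1 ⟨0, 0, 0, 0⟩).lo with hcanddef
        have hcand : cand = ov y0 s := by
          rw [hcanddef, ← hseq]; unfold ov; omega
        have hcandV : cand ≤ pairFold g1 g2 := by
          rw [hcand]; exact ov_le_pairFold g1 g2 y0 s hy0A hsA
        have hm'V : max m cand ≤ pairFold g1 g2 := max_le hmV hcandV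
        simp only [segLoop, if_neg hgid, if_pos hsid]
        rcases hadv : segAdvance S1 s.hi c1 with _ | c1'
        · rcases halive with hV | ⟨p, q, hpd, hqd, hpE, hqE, hovV⟩
          · exact le_antisymm hm'V (le_trans hV (le_max_left _ _))
          · have hprest : p ∈ rest := by
              rcases List.mem_cons.mp hpE with h | h
              · exfalso
                have : p.gid = 0 := gid_segsOf p g1 0 (hperm0.mem_iff.mp (List.mem_of_mem_drop hpd))
                rw [h] at this; exact hgid this
              · exact h
            have hphi : s.hi ≤ p.hi := hpe _ hprest
            have hqhi : q.hi ≤ s.hi := segAdvance_none S1 s.hi c1 hadv q hqd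
            have hqlo : (S1.getD c1 ⟨0, 0, 0, 0⟩).lo ≤ q.lo :=
              head_drop_le hsort1 hc1 hqd
            have hplo : y0.lo ≤ p.lo := head_drop_le hsort0 hc0 hpd
            have : pairFold g1 g2 ≤ cand := by
              rw [← hovV]; unfold ov; omega
            exact le_antisymm hm'V (le_trans this (le_max_right _ _))
        · obtain ⟨hlt', hhi', hmove⟩ := segAdvance_some S1 s.hi c1 c1' hadv
          have hz1A : S1.getD c1' ⟨0, 0, 0, 0⟩ ∈ segsOf g2 1 := by
            refine hperm1.mem_iff.mp ?_
            rw [List.getD_eq_getElem S1 _ hlt']; exact List.getElem_mem hlt'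
          have hz1rest : S1.getD c1' ⟨0, 0, 0, 0⟩ ∈ rest := by
            by_cases hin : S1.getD c1' ⟨0, 0, 0, 0⟩ ∈ s :: rest
            · rcases List.mem_cons.mp hin with h | h
              · exfalso; rw [h] at hhi'; omega
              · exact h
            · exfalso
              have := hproc _ (Or.inr hz1A) hin s List.mem_cons_self
              omega
          refine ih c0 c1' (max m cand) hErest hprocrest hEsubrest hc0 hlt' hy0rest hz1rest
            (le_trans hm0 (le_max_left _ _)) hm'V ?_
          rcases halive with hV | ⟨p, q, hpd, hqd, hpE, hqE, hovV⟩
          · exact Or.inl (le_trans hV (le_max_left _ _))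
          · have hprest : p ∈ rest := by
              rcases List.mem_cons.mp hpE with h | h
              · exfalso
                have : p.gid = 0 := gid_segsOf p g1 0 (hperm0.mem_iff.mp (List.mem_of_mem_drop hpd))
                rw [h] at this; exact hgid this
              · exact h
            have hphi : s.hi ≤ p.hi := hpe _ hprest
            have hplo : y0.lo ≤ p.lo := head_drop_le hsort0 hc0 hpd
            by_cases hqs : q = s
            · left
              subst hqs
              have hslo : q.lo = (S1.getD c1 ⟨0, 0, 0, 0⟩).lo := by rw [← hseq]
              have : pairFold g1 g2 ≤ cand := by
                rw [← hovV, hcanddef]; unfold ov; omega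
              exact le_trans this (le_max_right _ _)
            · have hqrest : q ∈ rest := by
                rcases List.mem_cons.mp hqE with h | h
                · exact absurd h hqs
                · exact h
              rcases hmove q hqd with hmv | hmv
              · exact Or.inr ⟨p, q, hpd, hmv, hprest, hqrest, hovV⟩
              · left
                have hqlo : (S1.getD c1 ⟨0, 0, 0, 0⟩).lo ≤ q.lo :=
                  head_drop_le hsort1 hc1 hqd
                have : pairFold g1 g2 ≤ cand := by
                  rw [← hovV]; unfold ov; omega
                exact le_trans this (le_max_right _ _)
      · simp only [segLoop, if_neg hgid, if_neg hsid]
        have hy1ne : S1.getD c1 ⟨0, 0, 0, 0⟩ ≠ s := by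
          intro hcon; rw [← hcon] at hsid; exact hsid rfl
        have hy1rest : S1.getD c1 ⟨0, 0, 0, 0⟩ ∈ rest := by
          rcases List.mem_cons.mp hy1 with h | h
          · exact absurd h hy1ne
          · exact h
        refine ih c0 c1 m hErest hprocrest hEsubrest hc0 hc1 hy0rest hy1rest hm0 hmV ?_
        rcases halive with hV | ⟨p, q, hpd, hqd, hpE, hqE, hovV⟩
        · exact Or.inl hV
        · have hprest : p ∈ rest := by
            rcases List.mem_cons.mp hpE with h | h
            · exfalso
              have : p.gid = 0 := gid_segsOf p g1 0 (hperm0.mem_iff.mp (List.mem_of_mem_drop hpd))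
              rw [h] at this; exact hgid this
            · exact h
          by_cases hqs : q = s
          · refine Or.inr ⟨p, S1.getD c1 ⟨0, 0, 0, 0⟩, hpd, mem_drop_head hc1, hprest, hy1rest, ?_⟩
            have hlo : (S1.getD c1 ⟨0, 0, 0, 0⟩).lo ≤ q.lo := head_drop_le hsort1 hc1 hqd
            have hhi : s.hi ≤ (S1.getD c1 ⟨0, 0, 0, 0⟩).hi := hpe _ hy1rest
            have hge : ov p q ≤ ov p (S1.getD c1 ⟨0, 0, 0, 0⟩) := by
              rw [hqs]; unfold ov; rw [hqs] at hlo; omega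
            have hle : ov p (S1.getD c1 ⟨0, 0, 0, 0⟩) ≤ pairFold g1 g2 :=
              ov_le_pairFold g1 g2 p _ (hperm0.mem_iff.mp (List.mem_of_mem_drop hpd)) hy1A
            omega
          · have hqrest : q ∈ rest := by
              rcases List.mem_cons.mp hqE with h | h
              · exact absurd h hqs
              · exact h
            exact Or.inr ⟨p, q, hpd, hqd, hprest, hqrest, hovV⟩

lemma cal_max_overlap_eq_alt (g1 g2 : List (Int × Int)) :
    cal_max_overlap g1 g2 = cal_max_overlap_alt g1 g2 := by
  unfold cal_max_overlap cal_max_overlap_alt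
  by_cases hemp : (g1.isEmpty || g2.isEmpty) = true
  · rw [if_pos hemp, if_pos hemp]
  · rw [if_neg hemp, if_neg hemp]
    have hne1 : g1 ≠ [] := by intro h; subst h; simp at hemp
    have hne2 : g2 ≠ [] := by intro h; subst h; simp at hemp
    show segLoop (PySem.List.sorted (segsOf g1 0) (fun x => x.lo))
      (PySem.List.sorted (segsOf g2 1) (fun x => x.lo)) 0 0 0
      (PySem.List.sorted (segsOf g1 0 ++ segsOf g2 1) (fun x => x.hi)) = pairFold g1 g2
    have hperm0 : (PySem.List.sorted (segsOf g1 0) (fun x => x.lo)).Perm (segsOf g1 0) :=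
      PySem.List.sorted_perm _ _ _
    have hperm1 : (PySem.List.sorted (segsOf g2 1) (fun x => x.lo)).Perm (segsOf g2 1) :=
      PySem.List.sorted_perm _ _ _
    have hpermE : (PySem.List.sorted (segsOf g1 0 ++ segsOf g2 1) (fun x => x.hi)).Perm
        (segsOf g1 0 ++ segsOf g2 1) := PySem.List.sorted_perm _ _ _
    have hlen0 : 0 < (PySem.List.sorted (segsOf g1 0) (fun x => x.lo)).length := by
      rw [hperm0.length_eq, length_segsOf]
      exact List.length_pos_iff.mpr hne1
    have hlen1 : 0 < (PySem.List.sorted (segsOf g2 1) (fun x => x.lo)).length := by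
      rw [hperm1.length_eq, length_segsOf]
      exact List.length_pos_iff.mpr hne2
    refine segLoop_eq g1 g2 _ _ hperm0 hperm1
      (PySem.List.sorted_pairwise _ _) (PySem.List.sorted_pairwise _ _) _ 0 0 0
      (PySem.List.sorted_pairwise _ _) ?_ ?_ hlen0 hlen1 ?_ ?_ le_rfl (pairFold_nonneg g1 g2) ?_
    · intro u hu hnot z hz
      exact absurd (hpermE.mem_iff.mpr (List.mem_append.mpr hu)) hnot
    · intro z hz
      exact List.mem_append.mp (hpermE.mem_iff.mp hz)
    · exact hpermE.mem_iff.mpr (List.mem_append.mpr (Or.inl (hperm0.mem_iff.mp (by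
        rw [List.getD_eq_getElem _ _ hlen0]; exact List.getElem_mem hlen0))))
    · exact hpermE.mem_iff.mpr (List.mem_append.mpr (Or.inr (hperm1.mem_iff.mp (by
        rw [List.getD_eq_getElem _ _ hlen1]; exact List.getElem_mem hlen1))))
    · rcases pairFold_cases g1 g2 with h0 | ⟨p, hp, q, hq, hov⟩
      · exact Or.inl (le_of_eq h0)
      · refine Or.inr ⟨p, q, ?_, ?_, ?_, ?_, hov⟩
        · rw [List.drop_zero]; exact hperm0.mem_iff.mpr hp
        · rw [List.drop_zero]; exact hperm1.mem_iff.mpr hq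
        · exact hpermE.mem_iff.mpr (List.mem_append.mpr (Or.inl hp))
        · exact hpermE.mem_iff.mpr (List.mem_append.mpr (Or.inr hq))

-- ===== VERDICT (by name: the statement is the Claim_ definition above) =====
theorem cal_max_overlap_spec : Claim_equal_cal_max_overlap := by
  intro g1 g2 _
  exact cal_max_overlap_eq_alt g1 g2
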